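-- pv_equiv track=rewrite | github.com/Amsan5941/Smart-Incident-Root-Cause-Analyzer | train/eval.py | extract_root_cause
-- ===== SOURCE A (Python) =====
-- def extract_root_cause(output: str) -> str:
--     """Extract the ROOT CAUSE line from model output."""
--     lines = output.split("\n")
--     for line in lines:
--         if line.strip().startswith("ROOT CAUSE:"):
--             return line.replace("ROOT CAUSE:", "").strip()
--     # Fallback: return first non-empty line
--     for line in lines:
--         if line.strip():
--             return line.strip()
--     return output.strip()
-- ===== SOURCE B (Python) =====
-- def extract_root_cause(output: str) -> str:
--     """One pass over the lines: return on a ROOT CAUSE match, remember the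
--     first non-empty stripped line for the fallback."""
--     first_nonempty = None
--     for line in output.split("\n"):
--         stripped = line.strip()
--         if stripped.startswith("ROOT CAUSE:"):
--             return line.replace("ROOT CAUSE:", "").strip()
--         if stripped and first_nonempty is None:
--             first_nonempty = stripped
--     return first_nonempty if first_nonempty is not None else output.strip()
-- ===== Notes on version B (the rewrite author's own statement) =====
-- stated objective: simpler
-- what changed: Replaces A's two separate scans of the line list (ROOT CAUSE scan, then first-non-empty scan) by a single pass that remembers the first non-empty stripped line while scanning for ROOT CAUSE.
import Mathlib
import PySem

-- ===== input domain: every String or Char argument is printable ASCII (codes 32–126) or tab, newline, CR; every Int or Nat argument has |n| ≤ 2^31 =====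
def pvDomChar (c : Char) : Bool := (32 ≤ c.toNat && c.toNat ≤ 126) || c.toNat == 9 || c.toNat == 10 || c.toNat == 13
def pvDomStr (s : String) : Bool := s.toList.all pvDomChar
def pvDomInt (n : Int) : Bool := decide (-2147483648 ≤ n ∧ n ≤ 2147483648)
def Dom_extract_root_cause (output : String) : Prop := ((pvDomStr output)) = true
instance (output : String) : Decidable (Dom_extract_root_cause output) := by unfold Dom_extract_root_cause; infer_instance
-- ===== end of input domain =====

-- B merges A's two scans of the line list into one pass (simpler decomposition, same cost).

-- ===== PORT A =====
-- first loop: return the ROOT CAUSE line, stripped of the marker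
def ercLoop1 : List String → Option String
  | [] => none
  | l :: ls =>
    if PySem.Str.startswith (PySem.Str.strip l) "ROOT CAUSE:" then
      some (PySem.Str.strip (PySem.Str.replace l "ROOT CAUSE:" ""))
    else ercLoop1 ls

-- second loop: first non-empty stripped line
def ercLoop2 : List String → Option String
  | [] => none
  | l :: ls =>
    if PySem.Str.strip l ≠ "" then some (PySem.Str.strip l) else ercLoop2 ls

def extract_root_cause (output : String) : String :=
  let lines := (PySem.Str.split? output "\n").getD []
  match ercLoop1 lines with
  | some r => r
  | none =>
    match ercLoop2 lines with
    | some r => r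
    | none => PySem.Str.strip output

-- ===== PORT B =====
-- single pass carrying first_nonempty (B's accumulator)
def ercGo (output : String) : List String → Option String → String
  | [], acc =>
    match acc with
    | some f => f
    | none => PySem.Str.strip output
  | l :: ls, acc =>
    let stripped := PySem.Str.strip l
    if PySem.Str.startswith stripped "ROOT CAUSE:" then
      PySem.Str.strip (PySem.Str.replace l "ROOT CAUSE:" "")
    else
      ercGo output ls (if stripped ≠ "" ∧ acc = none then some stripped else acc)

def extract_root_cause_alt (output : String) : String :=
  ercGo output ((PySem.Str.split? output "\n").getD []) none

-- ===== PRECONDITION & SPEC =====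
def Spec_extract_root_cause (output : String) (out : String) : Prop := out = extract_root_cause_alt output
instance (output : String) (out : String) : Decidable (Spec_extract_root_cause output out) := by unfold Spec_extract_root_cause; infer_instance

-- ===== CLAIM (what is proved, stated in full; the proofs are below) =====
def Claim_equal_extract_root_cause : Prop := ∀ (output : String), Dom_extract_root_cause output → Spec_extract_root_cause output (extract_root_cause output)

-- ===== LEMMAS AND PROOFS =====
-- invariant of B's single pass: it computes A's two-scan result, the pending
-- accumulator taking precedence over A's second scan
lemma ercGo_eq (output : String) (ls : List String) (acc : Option String) :
    ercGo output ls acc =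
      match ercLoop1 ls with
      | some r => r
      | none =>
        match acc with
        | some f => f
        | none =>
          match ercLoop2 ls with
          | some r => r
          | none => PySem.Str.strip output := by
  induction ls generalizing acc with
  | nil => cases acc <;> simp [ercGo, ercLoop1, ercLoop2]
  | cons l ls ih =>
    simp only [ercGo, ercLoop1, ercLoop2]
    by_cases hrc : PySem.Str.startswith (PySem.Str.strip l) "ROOT CAUSE:" = true
    · rw [if_pos hrc, if_pos hrc]
    · rw [if_neg hrc, if_neg hrc, ih]
      cases acc with
      | some f => simp
      | none =>
        by_cases hne : PySem.Str.strip l ≠ ""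
        · rw [if_pos ⟨hne, rfl⟩, if_pos hne]
        · rw [if_neg (by simp [hne]), if_neg hne]

-- ===== VERDICT (by name: the statement is the Claim_ definition above) =====
theorem extract_root_cause_spec : Claim_equal_extract_root_cause := by
  intro output _
  unfold Spec_extract_root_cause extract_root_cause extract_root_cause_alt
  rw [ercGo_eq]
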